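-- pv_equiv track=rewrite | github.com/TracyZhangyr/CS121_proj3-1 | WordList.py | common_line_num
-- ===== SOURCE A (Python) =====
-- def common_line_num(l:list) -> int: #l is the list of sets of line numbers, returns the max count of common line numbers
--     d = {}
--     searched_set = set()
--     result = 0
--
--     for s in l:
--         for line_num in s:
--             if line_num not in searched_set:
--                 searched_set.add(line_num)
--                 max_lines = 0
--                 for line_num_set in l:
--                     if line_num in line_num_set:
--                         max_lines += 1
--                 if max_lines >= result:
--                     result = max_lines
--     return result
-- ===== SOURCE B (Python) =====
-- def common_line_num(l: list) -> int:
--     # sort the deduplicated flattened values once, then scan maximal runs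
--     vals = sorted(x for s in l for x in set(s))
--     best = 0
--     run = 0
--     prev = None
--     for v in vals:
--         if v == prev:
--             run += 1
--         else:
--             run = 1
--             prev = v
--         if run > best:
--             best = run
--     return best
-- ===== Notes on version B (the rewrite author's own statement) =====
-- stated objective: faster
-- what changed: Replaced the quadratic rescan (for each new value, scan all sets again to count containers) by flatten-dedup + one sort + a single run-length scan of the sorted values.
import Mathlib
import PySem

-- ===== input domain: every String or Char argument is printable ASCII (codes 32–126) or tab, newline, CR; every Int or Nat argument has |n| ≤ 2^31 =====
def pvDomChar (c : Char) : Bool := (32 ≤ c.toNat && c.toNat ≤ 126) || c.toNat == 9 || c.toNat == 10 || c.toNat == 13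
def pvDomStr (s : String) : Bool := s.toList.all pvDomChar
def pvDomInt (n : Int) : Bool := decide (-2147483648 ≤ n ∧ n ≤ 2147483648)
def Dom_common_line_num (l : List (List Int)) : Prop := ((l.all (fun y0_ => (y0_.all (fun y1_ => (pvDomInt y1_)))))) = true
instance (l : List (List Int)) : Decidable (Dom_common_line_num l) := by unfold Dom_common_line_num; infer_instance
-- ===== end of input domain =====

-- B changes the algorithm: instead of re-scanning all sets for every new value (quadratic),
-- it sorts the deduplicated flattened values once and scans maximal runs (n log n).

-- ===== PORT A =====
-- inner per-element step of A: skip seen values, else rescan all of l counting containers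
def clnStepA (l : List (List Int)) (st : PySem.Set Int × Int) (line_num : Int) :
    PySem.Set Int × Int :=
  if PySem.Set.contains st.1 line_num then st
  else
    let searched := PySem.Set.add st.1 line_num
    let max_lines := l.foldl (fun m t => if line_num ∈ t then m + 1 else m) (0 : Int)
    if max_lines ≥ st.2 then (searched, max_lines) else (searched, st.2)

def common_line_num (l : List (List Int)) : Int :=
  (l.foldl (fun st s => s.foldl (clnStepA l) st) (PySem.Set.empty, (0 : Int))).2

-- ===== PORT B =====
-- run-length scan step: state (best, run, prev)
def clnStepB (st : Int × Int × Option Int) (v : Int) : Int × Int × Option Int :=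
  let (run, prev) := if some v = st.2.2 then (st.2.1 + 1, st.2.2) else ((1 : Int), some v)
  (if run > st.1 then run else st.1, run, prev)

def common_line_num_alt (l : List (List Int)) : Int :=
  let vals := PySem.List.sorted (l.flatMap (fun s => PySem.Set.ofList s)) (fun x => x) false
  (vals.foldl clnStepB ((0 : Int), (0 : Int), (none : Option Int))).1

-- ===== PRECONDITION & SPEC =====
def Spec_common_line_num (l : List (List Int)) (out : Int) : Prop := out = common_line_num_alt l
instance (l : List (List Int)) (out : Int) : Decidable (Spec_common_line_num l out) := by unfold Spec_common_line_num; infer_instance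

-- ===== CLAIM (what is proved, stated in full; the proofs are below) =====
def Claim_equal_common_line_num : Prop := ∀ (l : List (List Int)), Dom_common_line_num l → Spec_common_line_num l (common_line_num l)

-- ===== LEMMAS AND PROOFS =====

-- number of inner lists of l containing v, exactly A's inner rescan
def pvCnt (l : List (List Int)) (v : Int) : Int :=
  l.foldl (fun m t => if v ∈ t then m + 1 else m) 0

-- running maximum of f over xs, starting at 0
def pvMax (f : Int → Int) (xs : List Int) : Int :=
  xs.foldl (fun r v => max r (f v)) 0

theorem pvMax_acc_le (f : Int → Int) (xs : List Int) (a : Int) :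
    a ≤ xs.foldl (fun r v => max r (f v)) a := by
  induction xs generalizing a with
  | nil => simp
  | cons x t ih => exact le_trans (le_max_left a (f x)) (ih (max a (f x)))

theorem pvMax_le_acc (f : Int → Int) (xs : List Int) (a c : Int)
    (ha : a ≤ c) (h : ∀ v ∈ xs, f v ≤ c) :
    xs.foldl (fun r v => max r (f v)) a ≤ c := by
  induction xs generalizing a with
  | nil => simpa using ha
  | cons x t ih =>
    simp only [List.foldl_cons]
    exact ih (max a (f x)) (max_le ha (h x (by simp))) (fun v hv => h v (by simp [hv]))

theorem le_pvMax_acc (f : Int → Int) (xs : List Int) (a v : Int) (hv : v ∈ xs) :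
    f v ≤ xs.foldl (fun r v => max r (f v)) a := by
  induction xs generalizing a with
  | nil => simp at hv
  | cons x t ih =>
    simp only [List.foldl_cons]
    rcases List.mem_cons.mp hv with h | h
    · subst h; exact le_trans (le_max_right a (f v)) (pvMax_acc_le f t _)
    · exact ih _ h

theorem pvMax_nonneg (f : Int → Int) (xs : List Int) : 0 ≤ pvMax f xs :=
  pvMax_acc_le f xs 0

theorem le_pvMax (f : Int → Int) (xs : List Int) (v : Int) (hv : v ∈ xs) :
    f v ≤ pvMax f xs := le_pvMax_acc f xs 0 v hv

theorem pvMax_le (f : Int → Int) (xs : List Int) (c : Int)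
    (hc : 0 ≤ c) (h : ∀ v ∈ xs, f v ≤ c) : pvMax f xs ≤ c :=
  pvMax_le_acc f xs 0 c hc h

-- two maxima agree when each function value on one list is dominated on the other
theorem pvMax_eq (f g : Int → Int) (xs ys : List Int)
    (h1 : ∀ v ∈ xs, f v ≤ pvMax g ys) (h2 : ∀ v ∈ ys, g v ≤ pvMax f xs) :
    pvMax f xs = pvMax g ys :=
  le_antisymm (pvMax_le f xs _ (pvMax_nonneg g ys) h1)
    (pvMax_le g ys _ (pvMax_nonneg f xs) h2)

-- ===== A side: the nested folds compute pvMax (pvCnt l) over the flattened input =====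

theorem clnA_inner (l : List (List Int)) (xs : List Int) (S : PySem.Set Int) (r : Int)
    (hr : 0 ≤ r) (hS : ∀ v ∈ S, pvCnt l v ≤ r) :
    (xs.foldl (clnStepA l) (S, r)).2 = xs.foldl (fun r v => max r (pvCnt l v)) r := by
  induction xs generalizing S r with
  | nil => rfl
  | cons x t ih =>
    simp only [List.foldl_cons]
    by_cases hx : x ∈ S
    · have : clnStepA l (S, r) x = (S, r) := by
        simp only [clnStepA, PySem.Set.contains_eq_listContains]
        rw [if_pos (by simpa using hx)]
      rw [this, ih S r hr hS, max_eq_left (hS x hx)]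
    · have hstep : clnStepA l (S, r) x = (PySem.Set.add S x, max r (pvCnt l x)) := by
        simp only [clnStepA, PySem.Set.contains_eq_listContains, pvCnt]
        rw [if_neg (by simpa using hx)]
        split_ifs with h <;> simp <;> omega
      rw [hstep]
      refine ih _ _ (le_trans hr (le_max_left _ _)) ?_
      intro v hv
      rcases (PySem.Set.mem_add ..).mp hv with h | h
      · exact le_trans (hS v h) (le_max_left _ _)
      · subst h; exact le_max_right _ _
    
theorem clnA_eq_pvMax (l : List (List Int)) :
    common_line_num l = pvMax (pvCnt l) l.flatten := by
  unfold common_line_num pvMax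
  rw [← List.foldl_flatten]
  exact clnA_inner l l.flatten PySem.Set.empty 0 le_rfl (by simp [PySem.Set.empty])

-- ===== B side: the run scan over a sorted list computes pvMax of the count =====

-- max of the counts grows by exactly the appended element's new count
theorem pvMax_count_append (P : List Int) (x : Int) :
    pvMax (fun v => ((P ++ [x]).count v : Int)) (P ++ [x])
      = max (pvMax (fun v => (P.count v : Int)) P) (((P ++ [x]).count x : Int)) := by
  apply le_antisymm
  · refine pvMax_le _ _ _ (le_trans (pvMax_nonneg _ _) (le_max_left _ _)) ?_
    intro v hv
    by_cases hvx : v = x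
    · subst hvx; exact le_max_right _ _
    · have hvP : v ∈ P := by
        rcases List.mem_append.mp hv with h | h
        · exact h
        · simp at h; exact absurd h hvx
      have hcv : (P ++ [x]).count v = P.count v := by
        rw [List.count_append, List.count_eq_zero.mpr (show v ∉ [x] by simp [hvx]), Nat.add_zero]
      rw [hcv]
      exact le_trans (le_pvMax _ _ v hvP) (le_max_left _ _)
  · refine max_le ?_ ?_
    · refine pvMax_le _ _ _ (pvMax_nonneg _ _) ?_
      intro v hv
      have hle : (P.count v : Int) ≤ ((P ++ [x]).count v : Int) := by
        simp [List.count_append]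
      exact le_trans hle (le_pvMax _ _ v (List.mem_append_left _ hv))
    · exact le_pvMax _ _ x (by simp)

-- in a ≤-sorted list every element is ≤ the last one
theorem le_getLast_of_pairwise (P : List Int) (y : Int)
    (hP : P.Pairwise (· ≤ ·)) (hy : P.getLast? = some y) :
    ∀ a ∈ P, a ≤ y := by
  induction P using List.reverseRecOn with
  | nil => simp at hy
  | append_singleton Q z _ =>
    have hz : z = y := by simpa using hy
    subst hz
    intro a ha
    rcases List.mem_append.mp ha with h | h
    · exact (List.pairwise_append.mp hP).2.2 a h z (by simp)
    · simp at h; omega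

theorem clnB_scan (P : List Int) (hP : P.Pairwise (· ≤ ·)) :
    (P.foldl clnStepB ((0 : Int), (0 : Int), (none : Option Int))).1
        = pvMax (fun v => (P.count v : Int)) P ∧
    ((P = [] ∧ P.foldl clnStepB ((0 : Int), (0 : Int), (none : Option Int))
          = ((0 : Int), (0 : Int), (none : Option Int))) ∨
      (∃ x, P.getLast? = some x ∧
        (P.foldl clnStepB ((0 : Int), (0 : Int), (none : Option Int))).2.2 = some x ∧
        (P.foldl clnStepB ((0 : Int), (0 : Int), (none : Option Int))).2.1
          = (P.count x : Int))) := by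
  induction P using List.reverseRecOn with
  | nil => exact ⟨by simp [pvMax], Or.inl ⟨rfl, rfl⟩⟩
  | append_singleton P x ih =>
    have hP' : P.Pairwise (· ≤ ·) := (List.pairwise_append.mp hP).1
    have hle : ∀ a ∈ P, a ≤ x :=
      fun a ha => (List.pairwise_append.mp hP).2.2 a ha x (by simp)
    obtain ⟨h1, h2⟩ := ih hP'
    rw [List.foldl_append, List.foldl_cons, List.foldl_nil] at *
    rcases h2 with ⟨hPnil, hst⟩ | ⟨y, hy, hprev, hrun⟩
    · subst hPnil
      rw [hst]
      refine ⟨?_, Or.inr ⟨x, by simp, by simp [clnStepB], by simp [clnStepB]⟩⟩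
      simp [clnStepB, pvMax]
    · -- P is nonempty, ends in y
      by_cases hxy : x = y
      · -- the run continues
        have hcx : ((P ++ [x]).count x : Int)
            = (P.foldl clnStepB ((0 : Int), (0 : Int), (none : Option Int))).2.1 + 1 := by
          rw [hrun, hxy]
          simp [List.count_append]
        have hstep : clnStepB (P.foldl clnStepB ((0 : Int), (0 : Int), (none : Option Int))) x
            = (max (P.foldl clnStepB ((0 : Int), (0 : Int), (none : Option Int))).1
                  ((P.foldl clnStepB ((0 : Int), (0 : Int), (none : Option Int))).2.1 + 1),
               (P.foldl clnStepB ((0 : Int), (0 : Int), (none : Option Int))).2.1 + 1,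
               some y) := by
          simp only [clnStepB, hprev, hxy]
          split_ifs with h <;> simp <;> omega
        rw [hstep]
        refine ⟨?_, Or.inr ⟨x, by simp, by simp [hxy], by rw [hcx]⟩⟩
        rw [pvMax_count_append, h1, hcx]
      · -- a new value starts a run of length 1
        have hxP : x ∉ P := by
          intro hxinP
          have h1' : x ≤ y := le_getLast_of_pairwise P y hP' hy x hxinP
          have h2' : y ≤ x := hle y (List.mem_of_getLast? hy)
          exact hxy (le_antisymm h1' h2')
        have hcx : ((P ++ [x]).count x : Int) = 1 := by
          simp [List.count_append, List.count_eq_zero_of_not_mem hxP]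
        have hstep : clnStepB (P.foldl clnStepB ((0 : Int), (0 : Int), (none : Option Int))) x
            = (max (P.foldl clnStepB ((0 : Int), (0 : Int), (none : Option Int))).1 1,
               (1 : Int), some x) := by
          have hne : ¬ (some x = (P.foldl clnStepB ((0 : Int), (0 : Int), (none : Option Int))).2.2) := by
            rw [hprev]; simp [hxy]
          simp only [clnStepB, if_neg hne]
          split_ifs with h <;> simp <;> omega
        rw [hstep]
        refine ⟨?_, Or.inr ⟨x, by simp, rfl, by rw [hcx]⟩⟩
        rw [pvMax_count_append, h1, hcx]

theorem clnB_eq_pvMax (l : List (List Int)) :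
    common_line_num_alt l
      = pvMax (fun v =>
          ((PySem.List.sorted (l.flatMap (fun s => PySem.Set.ofList s)) (fun x => x) false).count v : Int))
        (PySem.List.sorted (l.flatMap (fun s => PySem.Set.ofList s)) (fun x => x) false) := by
  unfold common_line_num_alt
  exact (clnB_scan _ (by
    have := PySem.List.sorted_pairwise (l.flatMap (fun s => PySem.Set.ofList s)) (fun x => x)
    simpa using this)).1

-- ===== bridge: counts and memberships agree =====

theorem pvCnt_shift (l : List (List Int)) (v a : Int) :
    l.foldl (fun m t => if v ∈ t then m + 1 else m) a
      = a + l.foldl (fun m t => if v ∈ t then m + 1 else m) 0 := by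
  induction l generalizing a with
  | nil => simp
  | cons s t ih =>
    rw [List.foldl_cons, List.foldl_cons, ih (if v ∈ s then a + 1 else a), ih (if v ∈ s then (0 : Int) + 1 else 0)]
    split_ifs <;> ring

theorem count_flatMap_ofList (l : List (List Int)) (v : Int) :
    ((l.flatMap (fun s => PySem.Set.ofList s)).count v : Int) = pvCnt l v := by
  induction l with
  | nil => simp [pvCnt]
  | cons s t ih =>
    rw [List.flatMap_cons, List.count_append]
    have hcnt : pvCnt (s :: t) v = (if v ∈ s then 1 else 0) + pvCnt t v := by
      simp only [pvCnt, List.foldl_cons]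
      rw [pvCnt_shift]
      split_ifs <;> ring
    have hofl : ((PySem.Set.ofList s).count v : Int) = if v ∈ s then 1 else 0 := by
      by_cases h : v ∈ s
      · rw [List.count_eq_one_of_mem (PySem.Set.nodup_ofList _) (by simpa using h)]
        simp [h]
      · rw [List.count_eq_zero_of_not_mem (fun hc => h (by simpa using hc))]
        simp [h]
    rw [hcnt, ← ih, ← hofl]
    push_cast
    ring

theorem mem_flatMap_ofList (l : List (List Int)) (v : Int) :
    v ∈ l.flatMap (fun s => PySem.Set.ofList s) ↔ v ∈ l.flatten := by
  simp [List.mem_flatMap, List.mem_flatten, PySem.Set.mem_ofList]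

-- ===== VERDICT (by name: the statement is the Claim_ definition above) =====
theorem common_line_num_spec : Claim_equal_common_line_num := by
  intro l _
  unfold Spec_common_line_num
  rw [clnA_eq_pvMax, clnB_eq_pvMax]
  set F := PySem.List.sorted (l.flatMap (fun s => PySem.Set.ofList s)) (fun x => x) false with hF
  have hcount : ∀ v, (F.count v : Int) = pvCnt l v := by
    intro v
    rw [hF, List.Perm.count_eq (PySem.List.sorted_perm ..), count_flatMap_ofList]
  have hmem : ∀ v, v ∈ F ↔ v ∈ l.flatten := by
    intro v
    rw [hF, PySem.List.mem_sorted, mem_flatMap_ofList]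
  refine pvMax_eq _ _ _ _ ?_ ?_
  · intro v hv
    rw [← hcount v]
    exact le_pvMax _ _ v ((hmem v).mpr hv)
  · intro v hv
    rw [hcount v]
    exact le_pvMax _ _ v ((hmem v).mp hv)
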